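-- pv_equiv track=rewrite | github.com/future-internet-lab/cloud-resource-allocation-simulator | Algorithm.py | perform
-- ===== SOURCE A (Python) =====
-- from typing import List, Tuple
--
-- def perform(bin: List[int], package: int) -> int:
--     bin_quantity = len(bin)
--     wstIdx = -1
--     for i in range(bin_quantity):
--         if bin[i] >= package[i]:
--             if wstIdx == -1:
--                 wstIdx = i
--             elif bin[wstIdx] < bin[i]:
--                 wstIdx = i
--     return wstIdx
-- ===== SOURCE B (Python) =====
-- def perform(bin, package):
--     # sort-then-scan: order the indices by (-bin[i], i); the first feasible index
--     # in that order is the fullest-capacity (worst-fit) bin, earliest on ties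
--     order = sorted(range(len(bin)), key=lambda i: (-bin[i], i))
--     for i in order:
--         if bin[i] >= package[i]:
--             return i
--     return -1
-- ===== Notes on version B (the rewrite author's own statement) =====
-- stated objective: alternative
-- what changed: Replaces A's single-pass running-argmax loop (mutable best index with a -1 sentinel) by a sort-then-scan algorithm: sort the indices by (-bin[i], i) and return the first feasible index in that order.
-- outside the precondition, e.g. on perform([1, 2], [0]): A raises IndexError, B raises IndexError
import Mathlib
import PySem

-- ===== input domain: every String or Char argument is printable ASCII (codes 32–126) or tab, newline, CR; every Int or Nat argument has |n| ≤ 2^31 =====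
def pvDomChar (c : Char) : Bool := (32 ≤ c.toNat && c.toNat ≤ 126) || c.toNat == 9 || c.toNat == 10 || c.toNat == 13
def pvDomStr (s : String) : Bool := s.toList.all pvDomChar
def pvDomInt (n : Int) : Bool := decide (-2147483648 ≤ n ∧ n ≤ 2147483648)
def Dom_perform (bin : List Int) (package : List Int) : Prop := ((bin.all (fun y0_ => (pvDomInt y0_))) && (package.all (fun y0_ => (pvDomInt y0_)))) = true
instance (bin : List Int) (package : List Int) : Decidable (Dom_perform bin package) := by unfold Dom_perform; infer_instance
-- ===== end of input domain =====

-- B replaces A's single-pass running-argmax loop by a sort-then-scan: sort the indices by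
-- (-bin[i], i), return the first feasible one ('alternative': different algorithm, not faster).


-- ===== PORT A =====
-- for i in range(bin_quantity) ported as a fold over List.range; bin[i] / package[i]
-- accessed via getD 0, exact under Pre_perform (0 ≤ i < len(bin) ≤ len(package)).
def perform (bin : List Int) (package : List Int) : Int :=
  let bin_quantity := bin.length
  (List.range bin_quantity).foldl
    (fun wstIdx i =>
      if bin.getD i 0 ≥ package.getD i 0 then
        if wstIdx = -1 then (i : Int)
        else if bin.getD wstIdx.toNat 0 < bin.getD i 0 then (i : Int)
        else wstIdx
      else wstIdx)
    (-1)

-- ===== PORT B =====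
-- order = sorted(range(len(bin)), key=lambda i: (-bin[i], i)); Python's tuple key compares
-- lexicographically, ported as a key into Lex (Int × Int) via toLex; the for/return scan
-- is List.find? (first element satisfying the test), none ↦ the final 'return -1'.
def perform_alt (bin : List Int) (package : List Int) : Int :=
  let order := PySem.List.sorted (List.range bin.length)
      (fun i => toLex ((-(bin.getD i 0) : Int), (i : Int)))
  match order.find? (fun i => bin.getD i 0 ≥ package.getD i 0) with
  | some i => (i : Int)
  | none => -1

-- ===== PRECONDITION & SPEC =====
-- A evaluates package[i] for every i < len(bin), so it raises IndexError whenever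
-- package is shorter than bin; exactly those inputs are excluded.
def Pre_perform (bin : List Int) (package : List Int) : Prop := bin.length ≤ package.length
instance (bin : List Int) (package : List Int) : Decidable (Pre_perform bin package) := by unfold Pre_perform; infer_instance
def pvWitness_perform : List Int × List Int := ([3, 1, 5], [2, 2, 2])

def Spec_perform (bin : List Int) (package : List Int) (out : Int) : Prop := out = perform_alt bin package
instance (bin : List Int) (package : List Int) (out : Int) : Decidable (Spec_perform bin package out) := by unfold Spec_perform; infer_instance

-- ===== CLAIM (what is proved, stated in full; the proofs are below) =====
def Claim_equal_perform : Prop := ∀ (bin : List Int) (package : List Int), Dom_perform bin package → Pre_perform bin package → Spec_perform bin package (perform bin package)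

-- ===== LEMMAS AND PROOFS =====

-- feasibility of index i, and the sort key of B
def pvFeas (bin package : List Int) (i : Nat) : Prop := bin.getD i 0 ≥ package.getD i 0
def pvKey (bin : List Int) (i : Nat) : Lex (Int × Int) := toLex ((-(bin.getD i 0) : Int), (i : Int))

-- the common characterisation: m is a feasible index, strictly fuller than every earlier
-- feasible index and at least as full as every later one
def pvP (bin package : List Int) (m : Nat) : Prop :=
  m < bin.length ∧ pvFeas bin package m ∧
    ∀ j, j < bin.length → pvFeas bin package j →
      (j < m → bin.getD j 0 < bin.getD m 0) ∧ (m ≤ j → bin.getD j 0 ≤ bin.getD m 0)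

theorem pvP_unique (bin package : List Int) (m m' : Nat)
    (h : pvP bin package m) (h' : pvP bin package m') : m = m' := by
  obtain ⟨hm, hf, hall⟩ := h
  obtain ⟨hm', hf', hall'⟩ := h'
  rcases Nat.lt_trichotomy m m' with hlt | heq | hgt
  · have h1 := (hall' m hm hf).1 hlt
    have h2 := (hall m' hm' hf').2 (Nat.le_of_lt hlt)
    omega
  · exact heq
  · have h1 := (hall m' hm' hf').1 hgt
    have h2 := (hall' m hm hf).2 (Nat.le_of_lt hgt)
    omega

-- invariant of A's loop over range k
theorem pvA_char (bin package : List Int) (k : Nat) :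
    (let r := (List.range k).foldl
      (fun wstIdx i =>
        if bin.getD i 0 ≥ package.getD i 0 then
          if wstIdx = -1 then (i : Int)
          else if bin.getD wstIdx.toNat 0 < bin.getD i 0 then (i : Int)
          else wstIdx
        else wstIdx) (-1);
     (r = -1 ∧ ∀ i, i < k → ¬ pvFeas bin package i) ∨
     (∃ m : Nat, r = (m : Int) ∧ m < k ∧ pvFeas bin package m ∧
        ∀ j, j < k → pvFeas bin package j →
          (j < m → bin.getD j 0 < bin.getD m 0) ∧ (m ≤ j → bin.getD j 0 ≤ bin.getD m 0))) := by
  induction k with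
  | zero => left; simp
  | succ k ih =>
    simp only [List.range_succ, List.foldl_append, List.foldl_cons, List.foldl_nil] at *
    by_cases hk : pvFeas bin package k
    · have hk' : bin.getD k 0 ≥ package.getD k 0 := hk
      rcases ih with ⟨hr, hnone⟩ | ⟨m, hr, hmk, hfm, hall⟩
      · rw [hr]
        right; refine ⟨k, ?_, by omega, hk, ?_⟩
        · rw [if_pos hk', if_pos rfl]
        · intro j hj hfj
          constructor
          · intro hjk; exact absurd hfj (hnone j (by omega))
          · intro hkj; have : j = k := by omega
            subst this; omega
      · rw [hr]
        have hne : ¬ ((m : Int) = -1) := by omega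
        have hfm' : bin.getD m 0 ≥ package.getD m 0 := hfm
        by_cases hlt : bin.getD m 0 < bin.getD k 0
        · right; refine ⟨k, ?_, by omega, hk, ?_⟩
          · rw [if_pos hk', if_neg hne, Int.toNat_natCast, if_pos hlt]
          · intro j hj hfj
            constructor
            · intro _
              by_cases hjm : j < m
              · have := (hall j (by omega) hfj).1 hjm; omega
              · have := (hall j (by omega) hfj).2 (by omega)
                omega
            · intro hkj; have : j = k := by omega
              subst this; omega
        · right; refine ⟨m, ?_, by omega, hfm, ?_⟩
          · rw [if_pos hk', if_neg hne, Int.toNat_natCast, if_neg hlt]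
          · intro j hj hfj
            by_cases hjk : j < k
            · exact hall j hjk hfj
            · have : j = k := by omega
              subst this
              exact ⟨by omega, fun _ => by omega⟩
    · have hk' : ¬ (bin.getD k 0 ≥ package.getD k 0) := hk
      rcases ih with ⟨hr, hnone⟩ | ⟨m, hr, hmk, hfm, hall⟩
      · rw [hr]
        left
        refine ⟨by rw [if_neg hk'], ?_⟩
        intro i hi
        by_cases hik : i < k
        · exact hnone i hik
        · have : i = k := by omega
          subst this; exact hk
      · rw [hr]
        right
        refine ⟨m, by rw [if_neg hk'], by omega, hfm, ?_⟩
        intro j hj hfj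
        have : j < k := by
          by_contra h
          have : j = k := by omega
          subst this; exact hk hfj
        exact hall j this hfj

theorem pvA_spec (bin package : List Int) :
    (perform bin package = -1 ∧ ∀ i, i < bin.length → ¬ pvFeas bin package i) ∨
    (∃ m : Nat, perform bin package = (m : Int) ∧ pvP bin package m) := by
  have h := pvA_char bin package bin.length
  simp only at h
  rcases h with ⟨hr, hnone⟩ | ⟨m, hr, hm, hf, hall⟩
  · left; exact ⟨hr, hnone⟩
  · right; exact ⟨m, hr, hm, hf, hall⟩

-- B-side: facts about the sorted index list
theorem pvB_spec (bin package : List Int) :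
    (perform_alt bin package = -1 ∧ ∀ i, i < bin.length → ¬ pvFeas bin package i) ∨
    (∃ m : Nat, perform_alt bin package = (m : Int) ∧ pvP bin package m) := by
  set key := fun i => pvKey bin i with hkey
  set s := PySem.List.sorted (List.range bin.length) key with hs
  have hperm : s.Perm (List.range bin.length) := PySem.List.sorted_perm _ _ _
  have hmem : ∀ i, i ∈ s ↔ i < bin.length := by
    intro i; rw [hperm.mem_iff, List.mem_range]
  have hpair : s.Pairwise (fun a b => key a ≤ key b) := PySem.List.sorted_pairwise _ _
  have halt : perform_alt bin package =
      match s.find? (fun i => bin.getD i 0 ≥ package.getD i 0) with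
      | some i => (i : Int)
      | none => -1 := rfl
  rcases hfind : s.find? (fun i => bin.getD i 0 ≥ package.getD i 0) with _ | m
  · left
    constructor
    · rw [halt, hfind]
    · intro i hi hfi
      have hni := List.find?_eq_none.1 hfind i ((hmem i).2 hi)
      simp only [decide_eq_true_eq] at hni
      exact hni hfi
  · right
    refine ⟨m, by rw [halt, hfind], ?_⟩
    obtain ⟨hpm, as, bs, hsplit, hbefore⟩ := List.find?_eq_some_iff_append.1 hfind
    have hfm : pvFeas bin package m := by simpa [pvFeas] using hpm
    have hmlt : m < bin.length := (hmem m).1 (by rw [hsplit]; simp)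
    have hle : ∀ j, j < bin.length → pvFeas bin package j → key m ≤ key j := by
      intro j hj hfj
      have hjs : j ∈ s := (hmem j).2 hj
      rw [hsplit] at hjs
      rcases List.mem_append.1 hjs with hjas | hjmb
      · exfalso
        have hna := hbefore j hjas
        simp only [Bool.not_eq_true', decide_eq_false_iff_not] at hna
        exact hna hfj
      · rcases List.mem_cons.1 hjmb with rfl | hjbs
        · exact le_refl _
        · rw [hsplit] at hpair
          have := (List.pairwise_append.1 hpair).2.1
          exact (List.pairwise_cons.1 this).1 j hjbs
    refine ⟨hmlt, hfm, ?_⟩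
    intro j hj hfj
    have h := hle j hj hfj
    rw [hkey] at h
    simp only [pvKey] at h
    rcases Prod.Lex.le_iff.1 h with hlt | ⟨heq, hle2⟩
    · simp only [ofLex_toLex] at hlt
      constructor
      · intro _; omega
      · intro _; omega
    · simp only [ofLex_toLex] at heq hle2
      constructor
      · intro hjm; exfalso; omega
      · intro _; omega

-- ===== VERDICT (by name: the statement is the Claim_ definition above) =====
theorem perform_spec : Claim_equal_perform := by
  intro bin package _ _
  show perform bin package = perform_alt bin package
  rcases pvA_spec bin package with ⟨ha, hnone⟩ | ⟨m, hA, hPm⟩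
  · rcases pvB_spec bin package with ⟨hb, _⟩ | ⟨m, hB, hPm⟩
    · rw [ha, hb]
    · exact absurd hPm.2.1 (hnone m hPm.1)
  · rcases pvB_spec bin package with ⟨hb, hnone⟩ | ⟨m', hB, hPm'⟩
    · exact absurd hPm.2.1 (hnone m hPm.1)
    · rw [hA, hB, pvP_unique bin package m m' hPm hPm']
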